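-- pv_equiv track=rewrite | github.com/ankurbhambri/DS-Algo | dynamic-programming/Grid-based/longest-increasing-path-in-a-matrix.py | longestConsecutivePath
-- ===== SOURCE A (Python) =====
-- def longestConsecutivePath(matrix):
--
--     if not matrix:
--         return 0
--
--     rows, cols = len(matrix), len(matrix[0])
--     memo = [[-1] * cols for _ in range(rows)]
--
--     def dfs(r, c):
--
--         # If already computed, return the cached value
--         if memo[r][c] != -1:
--             return memo[r][c]
--
--         max_path = 1 # Every cell is a path of length 1
--
--         # Directions: Up, Down, Left, Right
--         for dr, dc in [(0, 1), (0, -1), (1, 0), (-1, 0)]: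
--
--             nr, nc = r + dr, c + dc
--
--             # Check bounds AND the Consecutive Condition: next must be current + 1
--             if 0 <= nr < rows and 0 <= nc < cols and matrix[nr][nc] == matrix[r][c] + 1:
--                 max_path = max(max_path, 1 + dfs(nr, nc))
--
--         memo[r][c] = max_path
--         return max_path
--
--     longest = 0
--     for i in range(rows):
--         for j in range(cols):
--             longest = max(longest, dfs(i, j))
--
--     return longest
-- ===== SOURCE B (Python) =====
-- def longestConsecutivePath(matrix):
--     if not matrix:
--         return 0
--     rows, cols = len(matrix), len(matrix[0])
--     dirs = ((0, 1), (0, -1), (1, 0), (-1, 0))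
--     dp = [[1] * cols for _ in range(rows)]
--     for _ in range(rows * cols):
--         new = []
--         for r in range(rows):
--             row = []
--             for c in range(cols):
--                 best = 1
--                 for dr, dc in dirs:
--                     nr, nc = r + dr, c + dc
--                     if 0 <= nr < rows and 0 <= nc < cols and matrix[nr][nc] == matrix[r][c] + 1:
--                         best = max(best, 1 + dp[nr][nc])
--                 row.append(best)
--             new.append(row)
--         if new == dp:
--             break
--         dp = new
--     ans = 0
--     for row in dp:
--         for x in row:
--             ans = max(ans, x)
--     return ans
-- ===== Notes on version B (the rewrite author's own statement) =====
-- stated objective: alternative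
-- what changed: Replaces the recursive memoized DFS with a bottom-up fixpoint iteration: a dp grid is repeatedly relaxed (dp[r][c] = 1 + max over in-bounds neighbours holding value+1) until it stabilizes, then the grid maximum is returned.
import Mathlib
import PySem

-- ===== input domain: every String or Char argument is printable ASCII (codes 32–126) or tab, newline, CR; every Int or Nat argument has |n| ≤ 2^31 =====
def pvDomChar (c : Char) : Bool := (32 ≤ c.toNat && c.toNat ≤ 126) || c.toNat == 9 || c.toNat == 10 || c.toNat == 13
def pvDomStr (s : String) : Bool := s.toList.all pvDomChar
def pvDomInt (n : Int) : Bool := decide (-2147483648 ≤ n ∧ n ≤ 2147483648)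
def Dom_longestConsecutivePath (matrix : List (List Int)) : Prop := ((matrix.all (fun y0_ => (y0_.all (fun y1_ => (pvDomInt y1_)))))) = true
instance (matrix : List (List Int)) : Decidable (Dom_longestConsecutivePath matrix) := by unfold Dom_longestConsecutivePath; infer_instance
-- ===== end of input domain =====

-- B replaces A's recursive memoized DFS by bottom-up fixpoint iteration of a dp grid
-- (relax until stable, then take the grid maximum); same return value, no speed claim.

-- ===== PORT A =====
-- shared small helpers (both Pythons contain the same direction list, the same
-- in-bounds/consecutive guard and the same `matrix[i][j]` reads):
-- `pvGet l r c d` is `l[r][c]` read with a default; exact whenever the indices are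
-- in bounds, which the guards ensure on every admitted input.
def pvGet (l : List (List Int)) (r c : Nat) (d : Int) : Int := (l.getD r []).getD c d

def pvDirs : List (Int × Int) := [(0, 1), (0, -1), (1, 0), (-1, 0)]

def pvNbr (r c : Nat) (d : Int × Int) : Nat × Nat :=
  (((r : Int) + d.1).toNat, ((c : Int) + d.2).toNat)

-- the Python guard `0 <= nr < rows and 0 <= nc < cols and matrix[nr][nc] == matrix[r][c] + 1`
def pvGood (m : List (List Int)) (r c : Nat) (d : Int × Int) : Bool :=
  decide (0 ≤ (r : Int) + d.1) && decide ((r : Int) + d.1 < (m.length : Int)) &&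
  decide (0 ≤ (c : Int) + d.2) && decide ((c : Int) + d.2 < ((m.headD []).length : Int)) &&
  decide (pvGet m (pvNbr r c d).1 (pvNbr r c d).2 0 = pvGet m r c 0 + 1)

-- Python `memo[r][c] = v` on the rectangular list of lists
def pvMset (memo : List (List Int)) (r c : Nat) (v : Int) : List (List Int) :=
  memo.set r ((memo.getD r []).set c v)

-- A's inner `dfs`, with the memo threaded through and a fuel guard for totality
-- (the top level supplies fuel rows*cols+1, proved sufficient below).
def pvDfs (m : List (List Int)) : Nat → Nat → Nat → List (List Int) → Int × List (List Int)
  | 0, _, _, memo => (1, memo)   -- fuel exhausted: unreachable for the supplied fuel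
  | k + 1, r, c, memo =>
    if pvGet memo r c (-1) ≠ -1 then (pvGet memo r c (-1), memo)
    else
      let res := pvDirs.foldl (fun (st : Int × List (List Int)) d =>
        if pvGood m r c d then
          let pr := pvDfs m k (pvNbr r c d).1 (pvNbr r c d).2 st.2
          (max st.1 (1 + pr.1), pr.2)
        else st) (1, memo)
      (res.1, pvMset res.2 r c res.1)

def longestConsecutivePath (matrix : List (List Int)) : Int :=
  if matrix = [] then 0
  else
    let rows := matrix.length
    let cols := (matrix.headD []).length
    let memo0 := List.replicate rows (List.replicate cols (-1 : Int))
    let st := (List.range rows).foldl (fun (st : Int × List (List Int)) i =>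
      (List.range cols).foldl (fun (st : Int × List (List Int)) j =>
        let pr := pvDfs matrix (rows * cols + 1) i j st.2
        (max st.1 pr.1, pr.2)) st) ((0 : Int), memo0)
    st.1

-- ===== PORT B =====
-- one relaxation sweep: new[r][c] = max(1, 1 + dp[nr][nc] over good neighbours)
def pvStep (m dp : List (List Int)) : List (List Int) :=
  (List.range m.length).map (fun r => (List.range (m.headD []).length).map (fun c =>
    pvDirs.foldl (fun (acc : Int) d =>
      if pvGood m r c d then max acc (1 + pvGet dp (pvNbr r c d).1 (pvNbr r c d).2 0)
      else acc) 1))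

-- the `for _ in range(rows*cols): … if new == dp: break` loop
def pvIter (m : List (List Int)) : Nat → List (List Int) → List (List Int)
  | 0, dp => dp
  | k + 1, dp =>
    let nw := pvStep m dp
    if nw = dp then dp else pvIter m k nw

def longestConsecutivePath_alt (matrix : List (List Int)) : Int :=
  if matrix = [] then 0
  else
    let dp := pvIter matrix (matrix.length * (matrix.headD []).length)
      (List.replicate matrix.length (List.replicate (matrix.headD []).length (1 : Int)))
    dp.foldl (fun a row => row.foldl (fun a x => max a x) a) 0

-- ===== PRECONDITION & SPEC =====
-- Pre_ excludes exactly the ragged inputs on which the Python A raises IndexError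
-- (some row shorter than the first row); A returns normally on every other input.
def Pre_longestConsecutivePath (matrix : List (List Int)) : Prop :=
  ∀ row ∈ matrix, (matrix.headD []).length ≤ row.length

instance (matrix : List (List Int)) : Decidable (Pre_longestConsecutivePath matrix) := by
  unfold Pre_longestConsecutivePath; infer_instance

def pvWitness_longestConsecutivePath : List (List Int) := [[1, 2], [4, 3]]

def Spec_longestConsecutivePath (matrix : List (List Int)) (out : Int) : Prop := out = longestConsecutivePath_alt matrix
instance (matrix : List (List Int)) (out : Int) : Decidable (Spec_longestConsecutivePath matrix out) := by unfold Spec_longestConsecutivePath; infer_instance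

-- ===== CLAIM (what is proved, stated in full; the proofs are below) =====
def Claim_equal_longestConsecutivePath : Prop := ∀ (matrix : List (List Int)), Dom_longestConsecutivePath matrix → Pre_longestConsecutivePath matrix → Spec_longestConsecutivePath matrix (longestConsecutivePath matrix)

-- ===== LEMMAS AND PROOFS =====

-- the common specification: pvBest m k r c is the value of k rounds of relaxation at (r,c)
def pvBest (m : List (List Int)) : Nat → Nat → Nat → Int
  | 0, _, _ => 1
  | k + 1, r, c => pvDirs.foldl (fun (acc : Int) d =>
      if pvGood m r c d then max acc (1 + pvBest m k (pvNbr r c d).1 (pvNbr r c d).2)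
      else acc) 1

def pvCells (m : List (List Int)) : List (Nat × Nat) :=
  (List.range m.length).flatMap (fun r => (List.range (m.headD []).length).map (fun c => (r, c)))

def pvBound (m : List (List Int)) (r c : Nat) : Nat :=
  (pvCells m).countP (fun p => decide (pvGet m r c 0 < pvGet m p.1 p.2 0))


-- basic facts about the guard and the bound

lemma pv_good_bounds {m : List (List Int)} {r c : Nat} {d : Int × Int}
    (h : pvGood m r c d = true) :
    (pvNbr r c d).1 < m.length ∧ (pvNbr r c d).2 < (m.headD []).length ∧
    pvGet m (pvNbr r c d).1 (pvNbr r c d).2 0 = pvGet m r c 0 + 1 := by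
  simp only [pvGood, Bool.and_eq_true, decide_eq_true_eq] at h
  obtain ⟨⟨⟨⟨h1, h2⟩, h3⟩, h4⟩, h5⟩ := h
  refine ⟨?_, ?_, h5⟩ <;> (simp only [pvNbr]; omega)

lemma pv_mem_cells {m : List (List Int)} {r c : Nat} :
    (r, c) ∈ pvCells m ↔ r < m.length ∧ c < (m.headD []).length := by
  simp only [pvCells, List.mem_flatMap, List.mem_map, List.mem_range, Prod.mk.injEq]
  constructor
  · rintro ⟨a, ha, b, hb, rfl, rfl⟩; exact ⟨ha, hb⟩
  · rintro ⟨hr, hc⟩; exact ⟨r, hr, c, hc, rfl, rfl⟩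

lemma pv_countP_strict {α : Type} {l : List α} {p q : α → Bool}
    (himp : ∀ a ∈ l, p a = true → q a = true) {x : α} (hx : x ∈ l)
    (hq : q x = true) (hp : p x = false) : l.countP p < l.countP q := by
  induction l with
  | nil => cases hx
  | cons a l ih =>
    rw [List.countP_cons, List.countP_cons]
    rcases List.mem_cons.mp hx with rfl | hx'
    · have hle := List.countP_mono_left (l := l)
        (fun b hb hpb => himp b (List.mem_cons_of_mem _ hb) hpb)
      rw [hp, hq]; simp only [Bool.false_eq_true, if_false, if_true]; omega
    · have h1 := ih (fun b hb => himp b (List.mem_cons_of_mem _ hb)) hx'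
      have h2 : (if p a = true then 1 else 0) ≤ (if q a = true then 1 else 0) := by
        split_ifs with hpa hqa
        · omega
        · exact absurd (himp a List.mem_cons_self hpa) hqa
        · omega
        · omega
      omega

lemma pv_bound_lt {m : List (List Int)} {r c : Nat} {d : Int × Int}
    (h : pvGood m r c d = true) :
    pvBound m (pvNbr r c d).1 (pvNbr r c d).2 < pvBound m r c := by
  obtain ⟨h1, h2, h3⟩ := pv_good_bounds h
  unfold pvBound
  apply pv_countP_strict (x := pvNbr r c d)
  · intro a _ hpa
    rw [decide_eq_true_eq] at hpa ⊢
    omega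
  · exact pv_mem_cells.mpr ⟨h1, h2⟩
  · rw [decide_eq_true_eq]; omega
  · rw [decide_eq_false_iff_not]; omega

lemma pv_bound_le (m : List (List Int)) (r c : Nat) :
    pvBound m r c ≤ m.length * (m.headD []).length := by
  have h1 : (pvCells m).length = m.length * (m.headD []).length := by
    simp [pvCells, List.length_flatMap, List.map_const']
  calc pvBound m r c ≤ (pvCells m).length := List.countP_le_length
    _ = _ := h1

-- generic lemmas about the direction fold

lemma pv_fold_congr (m : List (List Int)) (r c : Nat) (f g : Nat → Nat → Int) :
    ∀ (ds : List (Int × Int)) (a : Int),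
    (∀ d ∈ ds, pvGood m r c d = true →
      f (pvNbr r c d).1 (pvNbr r c d).2 = g (pvNbr r c d).1 (pvNbr r c d).2) →
    ds.foldl (fun (acc : Int) d =>
        if pvGood m r c d then max acc (1 + f (pvNbr r c d).1 (pvNbr r c d).2) else acc) a
      = ds.foldl (fun (acc : Int) d =>
        if pvGood m r c d then max acc (1 + g (pvNbr r c d).1 (pvNbr r c d).2) else acc) a := by
  intro ds
  induction ds with
  | nil => intro a _; rfl
  | cons d ds ih =>
    intro a h
    rw [List.foldl_cons, List.foldl_cons]
    by_cases hg : pvGood m r c d = true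
    · rw [if_pos hg, if_pos hg, h d List.mem_cons_self hg]
      exact ih _ (fun d' hd' => h d' (List.mem_cons_of_mem _ hd'))
    · rw [if_neg hg, if_neg hg]
      exact ih _ (fun d' hd' => h d' (List.mem_cons_of_mem _ hd'))

lemma pv_fold_no_good (m : List (List Int)) (r c : Nat) (f : Nat → Nat → Int)
    (hng : ∀ d, pvGood m r c d = false) :
    ∀ (ds : List (Int × Int)) (a : Int),
    ds.foldl (fun (acc : Int) d =>
        if pvGood m r c d then max acc (1 + f (pvNbr r c d).1 (pvNbr r c d).2) else acc) a = a := by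
  intro ds
  induction ds with
  | nil => intro a; rfl
  | cons d ds ih => intro a; rw [List.foldl_cons, if_neg (by simp [hng d])]; exact ih a

-- stabilization: pvBest m k r c is constant for k ≥ pvBound m r c

lemma pv_best_stable : ∀ (b : Nat) (m : List (List Int)) (r c : Nat),
    pvBound m r c = b → ∀ k, b ≤ k → pvBest m k r c = pvBest m b r c := by
  intro b
  induction b using Nat.strong_induction_on with
  | _ b IH =>
    intro m r c hb k hk
    cases k with
    | zero =>
      have hb0 : b = 0 := by omega
      subst hb0; rfl
    | succ k' =>
      cases b with
      | zero =>
        have hng : ∀ d, pvGood m r c d = false := by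
          intro d
          by_contra hd
          have hg : pvGood m r c d = true := by
            cases hgb : pvGood m r c d
            · exact absurd hgb hd
            · rfl
          have := pv_bound_lt hg
          omega
        show pvBest m (k' + 1) r c = pvBest m 0 r c
        simp only [pvBest]
        exact pv_fold_no_good m r c _ hng pvDirs 1
      | succ j =>
        rcases Nat.eq_or_lt_of_le hk with he | hlt
        · rw [he]
        · have hk' : j + 1 ≤ k' := by omega
          show pvBest m (k' + 1) r c = pvBest m (j + 1) r c
          simp only [pvBest]
          apply pv_fold_congr
          intro d _ hg
          have hblt := pv_bound_lt hg
          rw [hb] at hblt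
          have e1 := IH _ hblt m (pvNbr r c d).1 (pvNbr r c d).2 rfl k' (by omega)
          have e2 := IH _ hblt m (pvNbr r c d).1 (pvNbr r c d).2 rfl j (by omega)
          rw [e1, e2]

lemma pv_best_eq {m : List (List Int)} {r c : Nat} {k k' : Nat}
    (h : pvBound m r c ≤ k) (h' : pvBound m r c ≤ k') :
    pvBest m k r c = pvBest m k' r c := by
  rw [pv_best_stable (pvBound m r c) m r c rfl k h,
      pv_best_stable (pvBound m r c) m r c rfl k' h']

-- the memo invariant of port A

def pvInv (m memo : List (List Int)) : Prop :=
  memo.length = m.length ∧ (∀ row ∈ memo, row.length = (m.headD []).length) ∧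
  ∀ r c, r < m.length → c < (m.headD []).length →
    pvGet memo r c (-1) = -1 ∨
    pvGet memo r c (-1) = pvBest m (m.length * (m.headD []).length) r c

lemma pv_getD_row {memo : List (List Int)} {r : Nat} (hr : r < memo.length) :
    memo.getD r [] = memo[r] := by
  rw [List.getD_eq_getElem?_getD, List.getElem?_eq_getElem hr, Option.getD_some]

lemma pv_get_mset (memo : List (List Int)) (cols : Nat)
    (hrow : ∀ row ∈ memo, row.length = cols) (r c : Nat)
    (hr : r < memo.length) (hc : c < cols) (v : Int) (r' c' : Nat) :
    pvGet (pvMset memo r c v) r' c' (-1) =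
      if r' = r ∧ c' = c then v else pvGet memo r' c' (-1) := by
  have hrl : (memo.getD r []).length = cols := by
    rw [pv_getD_row hr]; exact hrow _ (List.getElem_mem hr)
  unfold pvGet pvMset
  by_cases h1 : r' = r
  · subst h1
    rw [List.getD_eq_getElem?_getD (l := memo.set r' _),
        List.getElem?_set_self (by simpa using hr), Option.getD_some]
    by_cases h2 : c' = c
    · subst h2
      rw [List.getD_eq_getElem?_getD, List.getElem?_set_self (by omega), Option.getD_some]
      simp
    · rw [List.getD_eq_getElem?_getD, List.getElem?_set_ne (fun he => h2 he.symm),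
          ← List.getD_eq_getElem?_getD]
      simp [h2]
  · rw [List.getD_eq_getElem?_getD (l := memo.set r _),
        List.getElem?_set_ne (fun he => h1 he.symm), ← List.getD_eq_getElem?_getD]
    simp [h1]

lemma pv_inv_mset {m memo : List (List Int)} (hinv : pvInv m memo) {r c : Nat}
    (hr : r < m.length) (hc : c < (m.headD []).length) :
    pvInv m (pvMset memo r c (pvBest m (m.length * (m.headD []).length) r c)) := by
  obtain ⟨hlen, hrow, hval⟩ := hinv
  refine ⟨by rw [pvMset, List.length_set, hlen], ?_, ?_⟩
  · intro row hmem
    rcases List.mem_or_eq_of_mem_set hmem with h | h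
    · exact hrow _ h
    · rw [h, List.length_set, pv_getD_row (by omega)]
      exact hrow _ (List.getElem_mem (by omega))
  · intro r' c' hr' hc'
    rw [pv_get_mset memo _ hrow r c (by omega) hc _ r' c']
    by_cases he : r' = r ∧ c' = c
    · rw [if_pos he, he.1, he.2]
      right; rfl
    · rw [if_neg he]
      exact hval r' c' hr' hc'

lemma pv_inv_init (m : List (List Int)) :
    pvInv m (List.replicate m.length (List.replicate (m.headD []).length (-1 : Int))) := by
  refine ⟨by simp, ?_, ?_⟩
  · intro row h
    rw [List.eq_of_mem_replicate h, List.length_replicate]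
  · intro r c hr hc
    left
    simp [pvGet, List.getD_eq_getElem?_getD, hr]

-- correctness of the memoized DFS

lemma pv_dfs_fold (m : List (List Int)) (k : Nat)
    (HIH : ∀ r c (memo : List (List Int)), r < m.length → c < (m.headD []).length →
      pvInv m memo → pvBound m r c < k →
      (pvDfs m k r c memo).1 = pvBest m (m.length * (m.headD []).length) r c ∧
      pvInv m (pvDfs m k r c memo).2) :
    ∀ (ds : List (Int × Int)) (r c : Nat) (a : Int) (memo : List (List Int)),
      pvInv m memo → pvBound m r c ≤ k →
      (ds.foldl (fun (st : Int × List (List Int)) d =>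
          if pvGood m r c d then
            let pr := pvDfs m k (pvNbr r c d).1 (pvNbr r c d).2 st.2
            (max st.1 (1 + pr.1), pr.2)
          else st) (a, memo)).1
        = ds.foldl (fun (acc : Int) d =>
            if pvGood m r c d then
              max acc (1 + pvBest m (m.length * (m.headD []).length) (pvNbr r c d).1 (pvNbr r c d).2)
            else acc) a ∧
      pvInv m (ds.foldl (fun (st : Int × List (List Int)) d =>
          if pvGood m r c d then
            let pr := pvDfs m k (pvNbr r c d).1 (pvNbr r c d).2 st.2
            (max st.1 (1 + pr.1), pr.2)
          else st) (a, memo)).2 := by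
  intro ds
  induction ds with
  | nil => intro r c a memo hinv _; exact ⟨rfl, hinv⟩
  | cons d ds ih =>
    intro r c a memo hinv hk
    rw [List.foldl_cons, List.foldl_cons]
    by_cases hg : pvGood m r c d = true
    · rw [if_pos hg, if_pos hg]
      obtain ⟨hb1, hb2, _⟩ := pv_good_bounds hg
      have hblt : pvBound m (pvNbr r c d).1 (pvNbr r c d).2 < k :=
        lt_of_lt_of_le (pv_bound_lt hg) hk
      obtain ⟨hv, hinv'⟩ := HIH (pvNbr r c d).1 (pvNbr r c d).2 memo hb1 hb2 hinv hblt
      simp only [hv]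
      exact ih r c _ _ hinv' hk
    · rw [if_neg hg, if_neg hg]
      exact ih r c a memo hinv hk

lemma pv_dfs_correct (m : List (List Int)) :
    ∀ (k r c : Nat) (memo : List (List Int)), r < m.length → c < (m.headD []).length →
      pvInv m memo → pvBound m r c < k →
      (pvDfs m k r c memo).1 = pvBest m (m.length * (m.headD []).length) r c ∧
      pvInv m (pvDfs m k r c memo).2 := by
  intro k
  induction k with
  | zero => intro r c memo _ _ _ h; omega
  | succ k ih =>
    intro r c memo hr hc hinv hk
    simp only [pvDfs]
    by_cases hhit : pvGet memo r c (-1) ≠ -1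
    · rw [if_pos hhit]
      rcases hinv.2.2 r c hr hc with h | h
      · exact absurd h hhit
      · exact ⟨h, hinv⟩
    · rw [if_neg hhit]
      obtain ⟨hfold, hinvf⟩ := pv_dfs_fold m k ih pvDirs r c 1 memo hinv (by omega)
      have hbest : pvDirs.foldl (fun (acc : Int) d =>
          if pvGood m r c d then
            max acc (1 + pvBest m (m.length * (m.headD []).length) (pvNbr r c d).1 (pvNbr r c d).2)
          else acc) 1 = pvBest m (m.length * (m.headD []).length) r c := by
        have e1 : pvBest m (m.length * (m.headD []).length) r c
            = pvBest m (pvBound m r c + 1) r c :=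
          pv_best_eq (pv_bound_le m r c) (by omega)
        rw [e1]
        show _ = pvBest m (pvBound m r c + 1) r c
        simp only [pvBest]
        apply pv_fold_congr
        intro d _ hg
        exact pv_best_eq (pv_bound_le m _ _) (le_of_lt (pv_bound_lt hg))
      simp only [hfold, hbest]
      exact ⟨trivial, pv_inv_mset hinvf hr hc⟩

-- the outer double loop of port A accumulates the maximum of pvBest

lemma pv_loopA_inner (m : List (List Int)) (i : Nat) (hi : i < m.length) :
    ∀ (cs : List Nat), (∀ j ∈ cs, j < (m.headD []).length) →
    ∀ (a : Int) (memo : List (List Int)), pvInv m memo →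
    ((cs.foldl (fun (st : Int × List (List Int)) j =>
        let pr := pvDfs m (m.length * (m.headD []).length + 1) i j st.2
        (max st.1 pr.1, pr.2)) (a, memo)).1
      = cs.foldl (fun (acc : Int) j =>
          max acc (pvBest m (m.length * (m.headD []).length) i j)) a) ∧
    pvInv m ((cs.foldl (fun (st : Int × List (List Int)) j =>
        let pr := pvDfs m (m.length * (m.headD []).length + 1) i j st.2
        (max st.1 pr.1, pr.2)) (a, memo)).2) := by
  intro cs
  induction cs with
  | nil => intro _ a memo hinv; exact ⟨rfl, hinv⟩
  | cons j cs ih =>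
    intro hjs a memo hinv
    rw [List.foldl_cons, List.foldl_cons]
    have hj := hjs j List.mem_cons_self
    obtain ⟨hv, hinv'⟩ := pv_dfs_correct m (m.length * (m.headD []).length + 1) i j memo hi hj
      hinv (by have := pv_bound_le m i j; omega)
    simp only [hv]
    exact ih (fun j' hj' => hjs j' (List.mem_cons_of_mem _ hj')) _ _ hinv'

lemma pv_loopA_outer (m : List (List Int)) :
    ∀ (rs : List Nat), (∀ i ∈ rs, i < m.length) →
    ∀ (a : Int) (memo : List (List Int)), pvInv m memo →
    ((rs.foldl (fun (st : Int × List (List Int)) i =>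
        (List.range (m.headD []).length).foldl (fun (st : Int × List (List Int)) j =>
          let pr := pvDfs m (m.length * (m.headD []).length + 1) i j st.2
          (max st.1 pr.1, pr.2)) st) (a, memo)).1
      = rs.foldl (fun (acc : Int) i =>
          (List.range (m.headD []).length).foldl (fun (acc : Int) j =>
            max acc (pvBest m (m.length * (m.headD []).length) i j)) acc) a) := by
  intro rs
  induction rs with
  | nil => intro _ a memo _; rfl
  | cons i rs ih =>
    intro his a memo hinv
    rw [List.foldl_cons, List.foldl_cons]
    obtain ⟨hv, hinv'⟩ := pv_loopA_inner m i (his i List.mem_cons_self)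
      (List.range (m.headD []).length) (fun j hj => List.mem_range.mp hj) a memo hinv
    have : ((List.range (m.headD []).length).foldl (fun (st : Int × List (List Int)) j =>
        let pr := pvDfs m (m.length * (m.headD []).length + 1) i j st.2
        (max st.1 pr.1, pr.2)) (a, memo))
      = (((List.range (m.headD []).length).foldl (fun (st : Int × List (List Int)) j =>
        let pr := pvDfs m (m.length * (m.headD []).length + 1) i j st.2
        (max st.1 pr.1, pr.2)) (a, memo)).1,
        ((List.range (m.headD []).length).foldl (fun (st : Int × List (List Int)) j =>
        let pr := pvDfs m (m.length * (m.headD []).length + 1) i j st.2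
        (max st.1 pr.1, pr.2)) (a, memo)).2) := rfl
    rw [this, hv]
    exact ih (fun i' hi' => his i' (List.mem_cons_of_mem _ hi')) _ _ hinv'

-- port B computes the canonical dp grid

def pvCanon (m : List (List Int)) (k : Nat) : List (List Int) :=
  (List.range m.length).map (fun r =>
    (List.range (m.headD []).length).map (fun c => pvBest m k r c))

lemma pv_canon_get (m : List (List Int)) (k r c : Nat)
    (hr : r < m.length) (hc : c < (m.headD []).length) :
    pvGet (pvCanon m k) r c 0 = pvBest m k r c := by
  have hc' : c < (m.head?.getD []).length := by
    simpa [List.headD_eq_head?_getD] using hc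
  simp [pvCanon, pvGet, List.getD_eq_getElem?_getD, hr, hc', List.headD_eq_head?_getD]

lemma pv_step_canon (m : List (List Int)) (k : Nat) :
    pvStep m (pvCanon m k) = pvCanon m (k + 1) := by
  unfold pvStep
  conv_rhs => rw [pvCanon]
  apply List.map_congr_left
  intro r hr
  apply List.map_congr_left
  intro c hc
  show _ = pvBest m (k + 1) r c
  simp only [pvBest]
  refine pv_fold_congr m r c (fun x y => pvGet (pvCanon m k) x y 0)
    (fun x y => pvBest m k x y) pvDirs 1 ?_
  intro d _ hg
  obtain ⟨hb1, hb2, _⟩ := pv_good_bounds hg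
  exact pv_canon_get m k _ _ hb1 hb2

lemma pv_init_canon (m : List (List Int)) :
    List.replicate m.length (List.replicate (m.headD []).length (1 : Int)) = pvCanon m 0 := by
  unfold pvCanon
  rw [show (fun r => (List.range (m.headD []).length).map
        (fun c => pvBest m 0 r c)) = (fun _ => List.replicate (m.headD []).length (1 : Int))
      from funext (fun r => by rw [show (fun c => pvBest m 0 r c) = (fun _ => (1 : Int)) from rfl,
        List.map_const', List.length_range])]
  rw [List.map_const', List.length_range]

lemma pv_canon_congr (m : List (List Int)) (k k' : Nat)
    (h : ∀ r c, r < m.length → c < (m.headD []).length → pvBest m k r c = pvBest m k' r c) :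
    pvCanon m k = pvCanon m k' := by
  unfold pvCanon
  apply List.map_congr_left
  intro r hr
  apply List.map_congr_left
  intro c hc
  exact h r c (List.mem_range.mp hr) (List.mem_range.mp hc)

lemma pv_best_fix (m : List (List Int)) (j : Nat)
    (h : ∀ r c, r < m.length → c < (m.headD []).length →
      pvBest m (j + 1) r c = pvBest m j r c) :
    ∀ (i : Nat) (r c : Nat), r < m.length → c < (m.headD []).length →
      pvBest m (j + i) r c = pvBest m j r c := by
  intro i
  induction i with
  | zero => intro r c _ _; rfl
  | succ i ih =>
    intro r c hr hc
    show pvBest m ((j + i) + 1) r c = pvBest m j r c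
    rw [← h r c hr hc]
    show pvBest m ((j + i) + 1) r c = pvBest m (j + 1) r c
    simp only [pvBest]
    apply pv_fold_congr
    intro d _ hg
    obtain ⟨hb1, hb2, _⟩ := pv_good_bounds hg
    exact ih _ _ hb1 hb2

lemma pv_iter_canon (m : List (List Int)) :
    ∀ (k j : Nat), pvIter m k (pvCanon m j) = pvCanon m (j + k) := by
  intro k
  induction k with
  | zero => intro j; rfl
  | succ k ih =>
    intro j
    simp only [pvIter, pv_step_canon]
    by_cases hfix : pvCanon m (j + 1) = pvCanon m j
    · rw [if_pos hfix]
      have hpt : ∀ r c, r < m.length → c < (m.headD []).length →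
          pvBest m (j + 1) r c = pvBest m j r c := by
        intro r c hr hc
        rw [← pv_canon_get m (j + 1) r c hr hc, hfix, pv_canon_get m j r c hr hc]
      exact (pv_canon_congr m (j + (k + 1)) j
        (fun r c hr hc => pv_best_fix m j hpt (k + 1) r c hr hc)).symm
    · rw [if_neg hfix, ih (j + 1)]
      congr 1
      omega

-- folding the grid maximum

lemma pv_fold_flat (m : List (List Int)) (e : Nat → Nat → Int) (a : Int) :
    ((List.range m.length).map (fun r =>
        (List.range (m.headD []).length).map (fun c => e r c))).foldl
      (fun a row => row.foldl (fun a x => max a x) a) a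
    = (List.range m.length).foldl (fun a r =>
        (List.range (m.headD []).length).foldl (fun a c => max a (e r c)) a) a := by
  rw [List.foldl_map]
  congr 1
  funext a r
  rw [List.foldl_map]

-- ===== VERDICT (by name: the statement is the Claim_ definition above) =====
theorem longestConsecutivePath_spec : Claim_equal_longestConsecutivePath := by
  intro matrix _ _
  unfold Spec_longestConsecutivePath
  by_cases hm : matrix = []
  · simp [longestConsecutivePath, longestConsecutivePath_alt, hm]
  · unfold longestConsecutivePath longestConsecutivePath_alt
    rw [if_neg hm, if_neg hm]
    have hA := pv_loopA_outer matrix (List.range matrix.length)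
      (fun i hi => List.mem_range.mp hi) 0
      (List.replicate matrix.length (List.replicate (matrix.headD []).length (-1 : Int)))
      (pv_inv_init matrix)
    simp only [hA]
    rw [pv_init_canon, pv_iter_canon, Nat.zero_add]
    rw [show pvCanon matrix (matrix.length * (matrix.headD []).length)
        = (List.range matrix.length).map (fun r =>
            (List.range (matrix.headD []).length).map (fun c =>
              pvBest matrix (matrix.length * (matrix.headD []).length) r c)) from rfl]
    rw [pv_fold_flat]
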